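-- pv_equiv track=rewrite | github.com/kh277/BOJ | 백준/Silver/13116. 30번/30번.py | solve
-- ===== SOURCE A (Python) =====
-- def solve(A, B):
--     resultA = []
--     while A > 1:
--         if A % 2 == 0:
--             resultA.append(0)
--         else:
--             resultA.append(1)
--         A //= 2
--     resultA = resultA[::-1]
--
--     resultB = []
--     while B > 1:
--         if B % 2 == 0:
--             resultB.append(0)
--         else:
--             resultB.append(1)
--         B //= 2
--     resultB = resultB[::-1]
--
--     result = 1
--     for i in range(min(len(resultA), len(resultB))):
--         if resultA[i] == resultB[i]:
--             if resultA[i] == 0: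
--                 result = result*2
--             else:
--                 result = result*2 + 1
--         else:
--             break
--
--     return result*10
-- ===== SOURCE B (Python) =====
-- def solve(A, B):
--     while A > 1 and B > 1 and A != B:
--         if A > B:
--             A //= 2
--         else:
--             B //= 2
--     return (A if A > 1 and B > 1 else 1) * 10
-- ===== Notes on version B (the rewrite author's own statement) =====
-- stated objective: idiomatic
-- what changed: B computes the heap LCA directly by repeatedly halving the larger of A and B until they meet (the classic LCA-by-halving idiom), instead of materialising both binary-digit lists, reversing them, and scanning for the common prefix.
import Mathlib
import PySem

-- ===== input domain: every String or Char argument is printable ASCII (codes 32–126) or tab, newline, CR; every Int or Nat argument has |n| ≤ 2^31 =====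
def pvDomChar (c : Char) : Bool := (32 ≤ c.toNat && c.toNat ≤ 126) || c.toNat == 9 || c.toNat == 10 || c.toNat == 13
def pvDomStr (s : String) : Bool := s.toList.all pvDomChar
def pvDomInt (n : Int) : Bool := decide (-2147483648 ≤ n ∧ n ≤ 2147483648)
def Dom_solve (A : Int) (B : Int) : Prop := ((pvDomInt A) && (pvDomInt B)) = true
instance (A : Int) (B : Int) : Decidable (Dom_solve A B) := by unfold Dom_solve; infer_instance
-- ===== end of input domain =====

-- B replaces A's build-two-bit-lists-and-scan-the-common-prefix with the idiomatic
-- halve-the-larger heap-LCA loop; same asymptotic cost, no lists materialised.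

-- ===== PORT A =====
-- termination helper for the `while A > 1: A //= 2` loops
theorem pv_fd2_lt (a : Int) (h : 1 < a) : (PySem.Int.floordiv a 2).toNat < a.toNat := by
  rw [PySem.Int.floordiv_eq_ediv_of_pos (by omega)]; omega

-- the `while X > 1` loop building the bit list (low bit first), i.e. resultA before [::-1]
def bitsRev (a : Int) : List Int :=
  if h : 1 < a then
    (if PySem.Int.mod a 2 = 0 then (0 : Int) else 1) :: bitsRev (PySem.Int.floordiv a 2)
  else []
termination_by a.toNat
decreasing_by exact pv_fd2_lt a h

-- the `for i in range(min(...))` loop with its break: walks both lists in step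
def pfx : List Int → List Int → Int → Int
  | x :: xs, y :: ys, r =>
    if x = y then (if x = 0 then pfx xs ys (r * 2) else pfx xs ys (r * 2 + 1)) else r
  | _, _, r => r

def solve (A : Int) (B : Int) : Int :=
  pfx (bitsRev A).reverse (bitsRev B).reverse 1 * 10

-- ===== PORT B =====
-- the `while A > 1 and B > 1 and A != B` halving loop of Source B
def lcaLoop (a : Int) (b : Int) : Int × Int :=
  if h : 1 < a ∧ 1 < b ∧ a ≠ b then
    if a > b then lcaLoop (PySem.Int.floordiv a 2) b
    else lcaLoop a (PySem.Int.floordiv b 2)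
  else (a, b)
termination_by a.toNat + b.toNat
decreasing_by
  · have := pv_fd2_lt a h.1; omega
  · have := pv_fd2_lt b h.2.1; omega

def solve_alt (A : Int) (B : Int) : Int :=
  let p := lcaLoop A B
  (if 1 < p.1 ∧ 1 < p.2 then p.1 else 1) * 10

-- ===== PRECONDITION & SPEC =====
def Spec_solve (A : Int) (B : Int) (out : Int) : Prop := out = solve_alt A B
instance (A : Int) (B : Int) (out : Int) : Decidable (Spec_solve A B out) := by unfold Spec_solve; infer_instance

-- ===== CLAIM (what is proved, stated in full; the proofs are below) =====
def Claim_equal_solve : Prop := ∀ (A : Int) (B : Int), Dom_solve A B → Spec_solve A B (solve A B)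

-- ===== LEMMAS AND PROOFS =====

theorem bitsRev_pos {a : Int} (h : 1 < a) :
    bitsRev a = (if PySem.Int.mod a 2 = 0 then (0 : Int) else 1) :: bitsRev (PySem.Int.floordiv a 2) := by
  rw [bitsRev]; simp [h]

theorem bitsRev_nonpos {a : Int} (h : ¬ 1 < a) : bitsRev a = [] := by
  rw [bitsRev]; simp [h]

theorem pfx_nil_left (ys : List Int) (r : Int) : pfx [] ys r = r := by cases ys <;> rfl

theorem pfx_nil_right (xs : List Int) (r : Int) : pfx xs [] r = r := by cases xs <;> rfl

theorem pfx_symm (xs : List Int) : ∀ (ys : List Int) (r : Int), pfx xs ys r = pfx ys xs r := by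
  induction xs with
  | nil => intro ys r; rw [pfx_nil_left, pfx_nil_right]
  | cons x xs ih =>
    intro ys r
    cases ys with
    | nil => rw [pfx_nil_left, pfx_nil_right]
    | cons y ys =>
      show (if x = y then _ else r) = (if y = x then _ else r)
      by_cases hxy : x = y
      · subst hxy; simp [ih]
      · rw [if_neg hxy, if_neg (fun h => hxy h.symm)]

theorem pfx_self (l : List Int) : ∀ r : Int,
    pfx l l r = l.foldl (fun r d => if d = 0 then r * 2 else r * 2 + 1) r := by
  induction l with
  | nil => intro r; rfl
  | cons x xs ih =>
    intro r
    show (if x = x then _ else r) = _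
    rw [if_pos rfl]
    by_cases hx : x = 0 <;> simp [hx, ih, List.foldl]

theorem foldl_bitsRev (n : Nat) : ∀ a : Int, a.toNat ≤ n → 0 < a →
    (bitsRev a).reverse.foldl (fun r d => if d = 0 then r * 2 else r * 2 + 1) 1 = a := by
  induction n using Nat.strong_induction_on with
  | _ n ih =>
    intro a hn ha
    by_cases h1 : 1 < a
    · have hfd : PySem.Int.floordiv a 2 = a / 2 := PySem.Int.floordiv_eq_ediv_of_pos (by omega)
      have hmd : PySem.Int.mod a 2 = a % 2 := PySem.Int.mod_eq_emod_of_pos (by omega)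
      rw [bitsRev_pos h1, List.reverse_cons, List.foldl_append]
      have hlt := pv_fd2_lt a h1
      have hrec := ih ((PySem.Int.floordiv a 2).toNat) (by omega) (PySem.Int.floordiv a 2)
        (le_refl _) (by rw [hfd]; omega)
      rw [hrec]
      simp only [List.foldl]
      by_cases he : PySem.Int.mod a 2 = 0
      · rw [if_pos he, if_pos rfl, hfd]
        rw [hmd] at he; omega
      · rw [if_neg he, if_neg (by norm_num), hfd]
        rw [hmd] at he; omega
    · have : a = 1 := by omega
      subst this
      rw [bitsRev_nonpos h1]; rfl

theorem bitsRev_val {a : Int} (ha : 0 < a) :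
    (bitsRev a).reverse.foldl (fun r d => if d = 0 then r * 2 else r * 2 + 1) 1 = a :=
  foldl_bitsRev a.toNat a (le_refl _) ha

theorem bitsRev_inj {a b : Int} (ha : 0 < a) (hb : 0 < b) (h : bitsRev a = bitsRev b) : a = b := by
  have := bitsRev_val ha
  rw [h, bitsRev_val hb] at this
  omega

theorem bitsRev_len_mono (n : Nat) : ∀ a b : Int, a.toNat ≤ n → b ≤ a →
    (bitsRev b).length ≤ (bitsRev a).length := by
  induction n using Nat.strong_induction_on with
  | _ n ih =>
    intro a b hn hba
    by_cases hb : 1 < b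
    · have ha : 1 < a := by omega
      have hfda : PySem.Int.floordiv a 2 = a / 2 := PySem.Int.floordiv_eq_ediv_of_pos (by omega)
      have hfdb : PySem.Int.floordiv b 2 = b / 2 := PySem.Int.floordiv_eq_ediv_of_pos (by omega)
      rw [bitsRev_pos ha, bitsRev_pos hb]
      simp only [List.length_cons, Nat.add_le_add_iff_right]
      have hlt := pv_fd2_lt a ha
      exact ih ((PySem.Int.floordiv a 2).toNat) (by omega) _ _ (le_refl _)
        (by rw [hfda, hfdb]; omega)
    · rw [bitsRev_nonpos hb]; simp
  -- note: ediv by 2 is monotone, handled by omega above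

theorem pfx_drop (xs : List Int) : ∀ (ys : List Int) (x r : Int),
    ys.length ≤ xs.length + 1 → xs ++ [x] ≠ ys →
    pfx (xs ++ [x]) ys r = pfx xs ys r := by
  induction xs with
  | nil =>
    intro ys x r hlen hne
    cases ys with
    | nil => simp [pfx_nil_right]
    | cons y ys =>
      cases ys with
      | nil =>
        have hxy : x ≠ y := by simpa using hne
        show (if x = y then _ else r) = r
        rw [if_neg hxy]
      | cons y' ys' => simp at hlen
  | cons x0 xs ih =>
    intro ys x r hlen hne
    cases ys with
    | nil => rw [pfx_nil_right, pfx_nil_right]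
    | cons y0 ys =>
      show (if x0 = y0 then _ else r) = (if x0 = y0 then _ else r)
      by_cases h0 : x0 = y0
      · subst h0
        rw [if_pos rfl, if_pos rfl]
        have hne' : xs ++ [x] ≠ ys := by
          intro h; exact hne (by simp [h])
        have hlen' : ys.length ≤ xs.length + 1 := by simpa using hlen
        by_cases hx0 : x0 = 0
        · rw [if_pos hx0, if_pos hx0]
          exact ih ys x _ hlen' hne'
        · rw [if_neg hx0, if_neg hx0]
          exact ih ys x _ hlen' hne'
      · rw [if_neg h0, if_neg h0]

theorem main_lemma (n : Nat) : ∀ a b : Int, a.toNat + b.toNat ≤ n →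
    pfx (bitsRev a).reverse (bitsRev b).reverse 1 =
      (if 1 < (lcaLoop a b).1 ∧ 1 < (lcaLoop a b).2 then (lcaLoop a b).1 else 1) := by
  induction n using Nat.strong_induction_on with
  | _ n ih =>
    intro a b hn
    by_cases hc : 1 < a ∧ 1 < b ∧ a ≠ b
    · obtain ⟨ha, hb, hab⟩ := hc
      have hne : (bitsRev a) ≠ (bitsRev b) := fun h =>
        hab (bitsRev_inj (by omega) (by omega) h)
      rw [lcaLoop, dif_pos ⟨ha, hb, hab⟩]
      by_cases hgt : a > b
      · rw [if_pos hgt]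
        have hlt := pv_fd2_lt a ha
        have hstep : pfx (bitsRev a).reverse (bitsRev b).reverse 1 =
            pfx (bitsRev (PySem.Int.floordiv a 2)).reverse (bitsRev b).reverse 1 := by
          rw [bitsRev_pos ha, List.reverse_cons]
          apply pfx_drop
          · have := bitsRev_len_mono a.toNat a b (le_refl _) (by omega)
            rw [bitsRev_pos ha] at this
            simpa using this
          · intro h
            apply hne
            have : (bitsRev a).reverse = (bitsRev b).reverse := by
              rw [bitsRev_pos ha, List.reverse_cons, h]
            simpa using this
        rw [hstep]
        exact ih ((PySem.Int.floordiv a 2).toNat + b.toNat) (by omega) _ _ (le_refl _)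
      · rw [if_neg hgt]
        have hba : b > a := by omega
        have hlt := pv_fd2_lt b hb
        have hstep : pfx (bitsRev a).reverse (bitsRev b).reverse 1 =
            pfx (bitsRev a).reverse (bitsRev (PySem.Int.floordiv b 2)).reverse 1 := by
          rw [pfx_symm, pfx_symm (bitsRev a).reverse]
          rw [bitsRev_pos hb, List.reverse_cons]
          apply pfx_drop
          · have := bitsRev_len_mono b.toNat b a (le_refl _) (by omega)
            rw [bitsRev_pos hb] at this
            simpa using this
          · intro h
            apply hne
            have : (bitsRev b).reverse = (bitsRev a).reverse := by
              rw [bitsRev_pos hb, List.reverse_cons, h]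
            have := congrArg List.reverse this
            simpa using this.symm
        rw [hstep]
        exact ih (a.toNat + (PySem.Int.floordiv b 2).toNat) (by omega) _ _ (le_refl _)
    · rw [lcaLoop, dif_neg hc]
      by_cases hab : 1 < a ∧ 1 < b
      · have heq : a = b := by
          by_contra h; exact hc ⟨hab.1, hab.2, h⟩
        subst heq
        rw [if_pos ⟨hab.1, hab.1⟩]
        rw [pfx_self, bitsRev_val (by omega : (0:Int) < a)]
      · rw [if_neg hab]
        rcases not_and_or.mp hab with h | h
        · rw [bitsRev_nonpos h, List.reverse_nil, pfx_nil_left]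
        · rw [bitsRev_nonpos h, List.reverse_nil, pfx_nil_right]

-- ===== VERDICT (by name: the statement is the Claim_ definition above) =====
theorem solve_spec : Claim_equal_solve := by
  intro A B _
  unfold Spec_solve solve solve_alt
  rw [main_lemma (A.toNat + B.toNat) A B (le_refl _)]
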